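-- pv_equiv track=rewrite | github.com/derekgwatson/bot-team | shared/auth/email_check.py | is_email_allowed_by_domain
-- ===== SOURCE A (Python) =====
-- def is_email_allowed_by_domain(email: str, allowed_domains: list) -> bool:
--     """
--     Check if email is from an allowed domain.
--
--     Args:
--         email: Email address to check
--         allowed_domains: List of allowed domain names (e.g., ['watsonblinds.com.au'])
--
--     Returns:
--         True if email domain is in allowed list
--     """
--     if not email or not allowed_domains:
--         return False
--
--     email = email.lower().strip()
--
--     for domain in allowed_domains:
--         if email.endswith(f'@{domain.lower()}'):
--             return True
--
--     return False
-- ===== SOURCE B (Python) =====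
-- def is_email_allowed_by_domain(email: str, allowed_domains: list) -> bool:
--     """Split off the domain after the last '@' and look it up in a set of
--     lowercased allowed domains, instead of testing endswith per domain."""
--     if not email or not allowed_domains:
--         return False
--     _local, sep, dom = email.lower().strip().rpartition('@')
--     if not sep:
--         return False
--     return dom in {d.lower() for d in allowed_domains}
-- ===== Notes on version B (the rewrite author's own statement) =====
-- stated objective: faster
-- what changed: B extracts the email's domain once with rpartition('@') and tests membership in a set of lowercased allowed domains, replacing A's per-domain endswith loop; Pre_ excludes inputs where the email contains '@' and some allowed-domain entry also contains '@' (malformed domain name), where A's suffix match and B's after-last-'@' extraction are both accidental readings.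
-- outside the precondition, e.g. on is_email_allowed_by_domain('x@a@b', ['a@b']): A returns True, B returns False
import Mathlib
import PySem

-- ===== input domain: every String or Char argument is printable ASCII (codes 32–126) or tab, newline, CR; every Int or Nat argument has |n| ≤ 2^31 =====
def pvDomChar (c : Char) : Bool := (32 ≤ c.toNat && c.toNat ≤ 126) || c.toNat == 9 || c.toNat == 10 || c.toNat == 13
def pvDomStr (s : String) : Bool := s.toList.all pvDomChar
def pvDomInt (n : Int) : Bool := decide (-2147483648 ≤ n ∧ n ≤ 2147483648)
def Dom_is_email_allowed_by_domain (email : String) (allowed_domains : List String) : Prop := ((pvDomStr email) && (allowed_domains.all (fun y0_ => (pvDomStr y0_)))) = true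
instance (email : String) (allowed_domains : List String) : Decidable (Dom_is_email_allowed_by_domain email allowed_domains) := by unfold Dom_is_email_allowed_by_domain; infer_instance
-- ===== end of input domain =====

-- B extracts the domain after the LAST '@' once and looks it up in a set of lowercased
-- allowed domains, replacing A's per-domain endswith loop (one pass over the email instead of one per domain).

-- ===== PORT A =====
def is_email_allowed_by_domain (email : String) (allowed_domains : List String) : Bool :=
  if email.toList.isEmpty || allowed_domains.isEmpty then false
  else
    let e := PySem.Chars.strip (PySem.Chars.lower email.toList)
    allowed_domains.any (fun domain =>
      PySem.Chars.endswith e ('@' :: PySem.Chars.lower domain.toList))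

-- ===== PORT B =====
-- hand port of str.rpartition('@') (PySem has no rpartition), split around the LAST '@':
-- 'none' renders rpartition's empty separator triple ('', '', s); exact on all inputs.
def pvRpartAt : List Char → Option (List Char × List Char)
  | [] => none
  | c :: rest =>
    match pvRpartAt rest with
    | some (b, a) => some (c :: b, a)
    | none => if c = '@' then some ([], rest) else none

def is_email_allowed_by_domain_alt (email : String) (allowed_domains : List String) : Bool :=
  if email.toList.isEmpty || allowed_domains.isEmpty then false
  else
    let e := PySem.Chars.strip (PySem.Chars.lower email.toList)
    match pvRpartAt e with
    | none => false            -- no '@': sep is empty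
    | some (_local, dom) =>
        PySem.Set.contains
          (PySem.Set.ofList (allowed_domains.map (fun d => PySem.Chars.lower d.toList))) dom

-- ===== PRECONDITION & SPEC =====
-- Pre_ excludes inputs where the email contains '@' and some allowed-domain string also
-- contains '@' (a malformed domain name): there A's endswith suffix-match and B's
-- after-last-'@' extraction are both accidental readings of an unspecified corner.
def Pre_is_email_allowed_by_domain (email : String) (allowed_domains : List String) : Prop :=
  '@' ∉ email.toList ∨ ∀ d ∈ allowed_domains, '@' ∉ d.toList
instance (email : String) (allowed_domains : List String) : Decidable (Pre_is_email_allowed_by_domain email allowed_domains) := by unfold Pre_is_email_allowed_by_domain; infer_instance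

def pvWitness_is_email_allowed_by_domain : String × List String :=
  ("User@Example.com", ["example.com", "watsonblinds.com.au"])

def Spec_is_email_allowed_by_domain (email : String) (allowed_domains : List String) (out : Bool) : Prop := out = is_email_allowed_by_domain_alt email allowed_domains
instance (email : String) (allowed_domains : List String) (out : Bool) : Decidable (Spec_is_email_allowed_by_domain email allowed_domains out) := by unfold Spec_is_email_allowed_by_domain; infer_instance

-- ===== CLAIM =====
def Claim_equal_is_email_allowed_by_domain : Prop := ∀ (email : String) (allowed_domains : List String), Dom_is_email_allowed_by_domain email allowed_domains → Pre_is_email_allowed_by_domain email allowed_domains → Spec_is_email_allowed_by_domain email allowed_domains (is_email_allowed_by_domain email allowed_domains)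

-- ===== LEMMAS AND PROOFS =====

-- pvRpartAt e = none exactly when e has no '@'
theorem pvRpartAt_none (e : List Char) : pvRpartAt e = none ↔ '@' ∉ e := by
  induction e with
  | nil => simp [pvRpartAt]
  | cons c rest ih =>
    unfold pvRpartAt
    cases hr : pvRpartAt rest with
    | some p => simp only [hr] at ih; simp [ih.symm]
    | none =>
      have hnr : '@' ∉ rest := ih.mp hr
      by_cases hc : c = '@' <;> simp [hc, hnr, eq_comm]

-- pvRpartAt finds exactly the decomposition around the LAST '@'
theorem pvRpartAt_iff (e b a : List Char) :
    pvRpartAt e = some (b, a) ↔ e = b ++ '@' :: a ∧ '@' ∉ a := by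
  induction e generalizing b a with
  | nil => simp [pvRpartAt]
  | cons c rest ih =>
    unfold pvRpartAt
    cases hr : pvRpartAt rest with
    | some p =>
      obtain ⟨b', a'⟩ := p
      obtain ⟨hdecomp, hna⟩ := (ih b' a').mp hr
      subst hdecomp
      simp only [Option.some.injEq, Prod.mk.injEq]
      constructor
      · rintro ⟨rfl, rfl⟩; exact ⟨rfl, hna⟩
      · rintro ⟨heq, hna2⟩
        cases b with
        | nil =>
          exfalso
          simp only [List.nil_append] at heq
          obtain ⟨-, htl⟩ := List.cons.inj heq
          exact hna2 (htl ▸ (by simp : '@' ∈ b' ++ '@' :: a'))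
        | cons x xs =>
          simp only [List.cons_append, List.cons.injEq] at heq
          obtain ⟨rfl, htl⟩ := heq
          have h2 := (ih xs a).mpr ⟨htl, hna2⟩
          rw [hr] at h2
          simp only [Option.some.injEq, Prod.mk.injEq] at h2
          simp [h2.1, h2.2]
    | none =>
      have hnr : '@' ∉ rest := (pvRpartAt_none rest).mp hr
      constructor
      · intro h
        by_cases hc : c = '@'
        · rw [if_pos hc] at h
          simp only [Option.some.injEq, Prod.mk.injEq] at h
          obtain ⟨rfl, rfl⟩ := h
          subst hc
          exact ⟨rfl, hnr⟩
        · rw [if_neg hc] at h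
          exact absurd h (by simp)
      · rintro ⟨heq, hna⟩
        cases b with
        | nil =>
          simp only [List.nil_append, List.cons.injEq] at heq
          obtain ⟨rfl, rfl⟩ := heq
          simp
        | cons x xs =>
          exfalso
          simp only [List.cons_append, List.cons.injEq] at heq
          exact hnr (heq.2 ▸ (by simp : '@' ∈ xs ++ '@' :: a))

-- lowering a character yields '@' only from '@' itself
theorem lowerChar_eq_at {c : Char} (h : PySem.Chars.lowerChar c = '@') : c = '@' := by
  unfold PySem.Chars.lowerChar PySem.Chars.isupper at h
  split at h
  · next hc =>
    exfalso
    rw [Bool.and_eq_true, decide_eq_true_eq, decide_eq_true_eq] at hc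
    have h2 : 65 ≤ c.toNat := hc.1
    have h3 : c.toNat ≤ 90 := hc.2
    have h1 : (Char.ofNat (c.toNat + 32)).toNat = ('@' : Char).toNat := by rw [h]
    rw [Char.toNat_ofNat, if_pos (Or.inl (by omega))] at h1
    have h4 : ('@' : Char).toNat = 64 := rfl
    omega
  · exact h

theorem lower_no_at {d : List Char} (h : '@' ∉ d) : '@' ∉ PySem.Chars.lower d := by
  intro hm
  obtain ⟨c, hc, hl⟩ := List.mem_map.mp hm
  exact h (lowerChar_eq_at hl ▸ hc)

theorem strip_subset (cs : List Char) (c : Char) (h : c ∈ PySem.Chars.strip cs) : c ∈ cs := by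
  unfold PySem.Chars.strip PySem.Chars.lstrip PySem.Chars.rstrip at h
  have h2 := (List.dropWhile_sublist (l := (List.dropWhile PySem.Chars.isspace cs).reverse)
      (p := PySem.Chars.isspace)).reverse.subset (by simpa using h)
  simp only [List.reverse_reverse] at h2
  exact (List.dropWhile_sublist _).subset h2

-- ===== VERDICT =====
theorem is_email_allowed_by_domain_spec : Claim_equal_is_email_allowed_by_domain := by
  intro email allowed _hdom hpre
  unfold Pre_is_email_allowed_by_domain at hpre
  unfold Spec_is_email_allowed_by_domain is_email_allowed_by_domain is_email_allowed_by_domain_alt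
  by_cases hg : email.toList.isEmpty || allowed.isEmpty
  · simp [hg]
  · rw [if_neg hg, if_neg hg]
    dsimp only
    set e := PySem.Chars.strip (PySem.Chars.lower email.toList) with he
    cases hr : pvRpartAt e with
    | none =>
      have hna : '@' ∉ e := (pvRpartAt_none e).mp hr
      simp only [List.any_eq_false]
      intro d hd
      intro hend
      obtain ⟨t, ht⟩ := PySem.Chars.endswith_iff .. |>.mp hend
      exact hna (by rw [← ht]; simp)
    | some p =>
      obtain ⟨b, dom⟩ := p
      obtain ⟨hdecomp, hnd⟩ := (pvRpartAt_iff e b dom).mp hr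
      -- e contains '@', so the email does too; Pre_ then gives '@'-free allowed domains
      have hat : '@' ∈ email.toList := by
        have h1 : '@' ∈ e := by rw [hdecomp]; simp
        have h2 := strip_subset _ _ (he ▸ h1)
        obtain ⟨c, hc, hl⟩ := List.mem_map.mp h2
        exact lowerChar_eq_at hl ▸ hc
      have hpre' : ∀ d ∈ allowed, '@' ∉ d.toList := hpre.resolve_left (by simp [hat])
      rw [Bool.eq_iff_iff]
      simp only [List.any_eq_true, PySem.Set.contains, List.contains_eq_mem, decide_eq_true_eq,
        PySem.Set.mem_ofList, List.mem_map]
      constructor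
      · rintro ⟨d, hd, hend⟩
        refine ⟨d, hd, ?_⟩
        obtain ⟨t, ht⟩ := PySem.Chars.endswith_iff .. |>.mp hend
        have hld : '@' ∉ PySem.Chars.lower d.toList := lower_no_at (hpre' d hd)
        have hsame := (pvRpartAt_iff e t (PySem.Chars.lower d.toList)).mpr ⟨ht.symm, hld⟩
        rw [hr] at hsame
        simp only [Option.some.injEq, Prod.mk.injEq] at hsame
        exact hsame.2.symm
      · rintro ⟨d, hd, hdom⟩
        refine ⟨d, hd, ?_⟩
        rw [PySem.Chars.endswith_iff]
        exact ⟨b, by rw [hdecomp, hdom]⟩
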